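-- pv_equiv track=rewrite | github.com/zhefujin/Pacman | assignment/recorder.py | _directional_seeds
-- ===== SOURCE A (Python) =====
-- def _directional_seeds(px: int, py: int, seeds_grid: list) -> tuple:
--     rows = len(seeds_grid)
--     cols = len(seeds_grid[0]) if rows else 0
--
--     def count(x_range, y_range) -> int:
--         total = 0
--         for gy in y_range:
--             if not (0 <= gy < rows):
--                 continue
--             for gx in x_range:
--                 if 0 <= gx < cols and seeds_grid[gy][gx]:
--                     total += 1
--         return total
--
--     right = count(range(px, px + 5), range(py - 2, py + 3))
--     left = count(range(px - 5, px),     range(py - 2, py + 3))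
--     down = count(range(px - 2, px + 3), range(py, py + 5))
--     up = count(range(px - 2, px + 3), range(py - 5, py))
--     return right, left, down, up
-- ===== SOURCE B (Python) =====
-- def _directional_seeds(px: int, py: int, seeds_grid: list) -> tuple:
--     rows = len(seeds_grid)
--     cols = len(seeds_grid[0]) if rows else 0
--     right = left = down = up = 0
--     for gy in range(py - 5, py + 5):
--         if not (0 <= gy < rows):
--             continue
--         for gx in range(px - 5, px + 5):
--             if not (0 <= gx < cols):
--                 continue
--             r_ok = py - 2 <= gy < py + 3 and px <= gx < px + 5
--             l_ok = py - 2 <= gy < py + 3 and px - 5 <= gx < px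
--             d_ok = px - 2 <= gx < px + 3 and py <= gy < py + 5
--             u_ok = px - 2 <= gx < px + 3 and py - 5 <= gy < py
--             if (r_ok or l_ok or d_ok or u_ok) and seeds_grid[gy][gx]:
--                 right += r_ok
--                 left += l_ok
--                 down += d_ok
--                 up += u_ok
--     return right, left, down, up
-- ===== Notes on version B (the rewrite author's own statement) =====
-- stated objective: alternative
-- what changed: Replaces A's four independent nested window scans by a single scan of the 10x10 union bounding box around (px,py) that classifies each in-bounds seed cell into every window rectangle it belongs to, incrementing all matching counters at once.
import Mathlib
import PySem

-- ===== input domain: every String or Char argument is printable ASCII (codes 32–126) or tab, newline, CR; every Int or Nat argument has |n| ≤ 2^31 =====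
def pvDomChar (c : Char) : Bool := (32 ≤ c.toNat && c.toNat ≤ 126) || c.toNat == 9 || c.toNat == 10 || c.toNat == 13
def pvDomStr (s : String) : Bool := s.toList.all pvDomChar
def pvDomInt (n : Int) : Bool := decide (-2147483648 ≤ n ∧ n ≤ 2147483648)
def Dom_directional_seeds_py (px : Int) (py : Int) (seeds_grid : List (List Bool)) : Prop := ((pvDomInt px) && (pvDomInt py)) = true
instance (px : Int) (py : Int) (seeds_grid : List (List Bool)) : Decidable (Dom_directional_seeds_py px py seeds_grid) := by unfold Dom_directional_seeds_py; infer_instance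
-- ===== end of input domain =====

-- B replaces A's four independent window scans by one scan of the 10x10 union bounding box
-- that classifies each seed cell into every window it belongs to (alternative decomposition, same cost).


-- ===== PORT A =====
def directional_seeds_py (px : Int) (py : Int) (seeds_grid : List (List Bool)) : Int × Int × Int × Int :=
  let rows : Int := seeds_grid.length
  let cols : Int := if rows ≠ 0 then ((PySem.List.pyGetD seeds_grid 0 []).length : Int) else 0
  let count : List Int → List Int → Int := fun x_range y_range =>
    y_range.foldl (fun total gy =>
      if 0 ≤ gy ∧ gy < rows then
        x_range.foldl (fun t gx =>
          if 0 ≤ gx ∧ gx < cols ∧ PySem.List.pyGetD (PySem.List.pyGetD seeds_grid gy []) gx false = true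
          then t + 1 else t) total
      else total) 0
  let right := count (PySem.List.pyRange px (px+5) 1) (PySem.List.pyRange (py-2) (py+3) 1)
  let left  := count (PySem.List.pyRange (px-5) px 1) (PySem.List.pyRange (py-2) (py+3) 1)
  let down  := count (PySem.List.pyRange (px-2) (px+3) 1) (PySem.List.pyRange py (py+5) 1)
  let up    := count (PySem.List.pyRange (px-2) (px+3) 1) (PySem.List.pyRange (py-5) py 1)
  (right, left, down, up)

-- ===== PORT B =====
def directional_seeds_py_alt (px : Int) (py : Int) (seeds_grid : List (List Bool)) : Int × Int × Int × Int :=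
  let rows : Int := seeds_grid.length
  let cols : Int := if rows ≠ 0 then ((PySem.List.pyGetD seeds_grid 0 []).length : Int) else 0
  (PySem.List.pyRange (py-5) (py+5) 1).foldl (fun (acc : Int × Int × Int × Int) gy =>
    if 0 ≤ gy ∧ gy < rows then
      (PySem.List.pyRange (px-5) (px+5) 1).foldl (fun (acc2 : Int × Int × Int × Int) gx =>
        if 0 ≤ gx ∧ gx < cols then
          let r_ok : Prop := py - 2 ≤ gy ∧ gy < py + 3 ∧ px ≤ gx ∧ gx < px + 5
          let l_ok : Prop := py - 2 ≤ gy ∧ gy < py + 3 ∧ px - 5 ≤ gx ∧ gx < px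
          let d_ok : Prop := px - 2 ≤ gx ∧ gx < px + 3 ∧ py ≤ gy ∧ gy < py + 5
          let u_ok : Prop := px - 2 ≤ gx ∧ gx < px + 3 ∧ py - 5 ≤ gy ∧ gy < py
          if (r_ok ∨ l_ok ∨ d_ok ∨ u_ok) ∧ PySem.List.pyGetD (PySem.List.pyGetD seeds_grid gy []) gx false = true then
            (acc2.1 + (if r_ok then 1 else 0), acc2.2.1 + (if l_ok then 1 else 0),
             acc2.2.2.1 + (if d_ok then 1 else 0), acc2.2.2.2 + (if u_ok then 1 else 0))
          else acc2
        else acc2) acc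
    else acc) (0, 0, 0, 0)

-- ===== PRECONDITION & SPEC =====
-- (gx, gy) lies in the union of the four directional windows around (px, py)
def pvWindowHit (px py gx gy : Int) : Prop :=
  (py - 2 ≤ gy ∧ gy < py + 3 ∧ px - 5 ≤ gx ∧ gx < px + 5) ∨
  (px - 2 ≤ gx ∧ gx < px + 3 ∧ py - 5 ≤ gy ∧ gy < py + 5)

-- Pre_ excludes exactly the inputs on which Python A raises IndexError: a row shorter than the
-- first row (whose length is taken as the grid width) reached by one of the directional windows.
def Pre_directional_seeds_py (px : Int) (py : Int) (seeds_grid : List (List Bool)) : Prop :=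
  ∀ p ∈ PySem.List.enumerate seeds_grid 0,
    ∀ gx ∈ PySem.List.pyRange (p.2.length : Int) ((seeds_grid.headD []).length : Int) 1,
      ¬ pvWindowHit px py gx p.1

instance (px : Int) (py : Int) (seeds_grid : List (List Bool)) : Decidable (Pre_directional_seeds_py px py seeds_grid) := by
  unfold Pre_directional_seeds_py pvWindowHit; infer_instance

def pvWitness_directional_seeds_py : Int × Int × List (List Bool) := (0, 0, [[true]])

def Spec_directional_seeds_py (px : Int) (py : Int) (seeds_grid : List (List Bool)) (out : Int × Int × Int × Int) : Prop := out = directional_seeds_py_alt px py seeds_grid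
instance (px : Int) (py : Int) (seeds_grid : List (List Bool)) (out : Int × Int × Int × Int) : Decidable (Spec_directional_seeds_py px py seeds_grid out) := by unfold Spec_directional_seeds_py; infer_instance

-- ===== CLAIM (what is proved, stated in full; the proofs are below) =====
def Claim_equal_directional_seeds_py : Prop := ∀ (px : Int) (py : Int) (seeds_grid : List (List Bool)), Dom_directional_seeds_py px py seeds_grid → Pre_directional_seeds_py px py seeds_grid → Spec_directional_seeds_py px py seeds_grid (directional_seeds_py px py seeds_grid)

-- ===== LEMMAS AND PROOFS =====

-- sum of f over the integer interval [a, b)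
def pvSumR (a b : Int) (f : Int → Int) : Int := ((PySem.List.pyRange a b 1).map f).sum

theorem pvSumR_congr (a b : Int) (f g : Int → Int) (h : ∀ x, a ≤ x → x < b → f x = g x) :
    pvSumR a b f = pvSumR a b g := by
  unfold pvSumR
  rw [List.map_congr_left]
  intro x hx
  rw [PySem.List.mem_pyRange_one] at hx
  exact h x hx.1 hx.2

theorem pvSumR_zero (a b : Int) (f : Int → Int) (h : ∀ x, a ≤ x → x < b → f x = 0) :
    pvSumR a b f = 0 := by
  rw [pvSumR_congr a b f (fun _ => 0) h]
  unfold pvSumR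
  simp

theorem pvSumR_extend (L R a b : Int) (f : Int → Int) (hL : L ≤ a) (hR : b ≤ R)
    (_hLR : L ≤ R) (h : ∀ x, f x ≠ 0 → a ≤ x ∧ x < b) :
    pvSumR L R f = pvSumR a b f := by
  by_cases hab : a < b
  · have haR : a ≤ R := le_trans hab.le hR
    have hbL : L ≤ b := le_trans hL hab.le
    unfold pvSumR
    rw [PySem.List.pyRange_one_append L a R hL haR,
        PySem.List.pyRange_one_append a b R hab.le hR]
    simp only [List.map_append, List.sum_append]
    have h1 : ((PySem.List.pyRange L a 1).map f).sum = 0 := by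
      have := pvSumR_zero L a f (fun x h1 h2 => by
        by_contra hne
        exact absurd ((h x hne).1) (by omega))
      simpa [pvSumR] using this
    have h2 : ((PySem.List.pyRange b R 1).map f).sum = 0 := by
      have := pvSumR_zero b R f (fun x h1 h2 => by
        by_contra hne
        exact absurd ((h x hne).2) (by omega))
      simpa [pvSumR] using this
    rw [h1, h2]; ring
  · rw [pvSumR_zero a b f (fun x h1 h2 => by omega),
        pvSumR_zero L R f (fun x _ _ => by
          by_contra hne
          have := h x hne; omega)]

theorem pv_foldl_count (l : List Int) (P : Int → Prop) [DecidablePred P] (t : Int) :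
    l.foldl (fun t x => if P x then t + 1 else t) t
      = t + (l.map (fun x => if P x then (1:Int) else 0)).sum := by
  induction l generalizing t with
  | nil => simp
  | cons x xs ih =>
    simp only [List.foldl_cons, List.map_cons, List.sum_cons, ih]
    split_ifs <;> ring

theorem pv_foldl_addf (l : List Int) (Q : Int → Prop) [DecidablePred Q] (c : Int → Int) (t : Int) :
    l.foldl (fun t x => if Q x then t + c x else t) t
      = t + (l.map (fun x => if Q x then c x else 0)).sum := by
  induction l generalizing t with
  | nil => simp
  | cons x xs ih =>
    simp only [List.foldl_cons, List.map_cons, List.sum_cons, ih]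
    split_ifs <;> ring

theorem pv_foldl4 (l : List Int) (f1 f2 f3 f4 : Int → Int) (t : Int × Int × Int × Int) :
    l.foldl (fun t x => (t.1 + f1 x, t.2.1 + f2 x, t.2.2.1 + f3 x, t.2.2.2 + f4 x)) t
      = (t.1 + (l.map f1).sum, t.2.1 + (l.map f2).sum,
         t.2.2.1 + (l.map f3).sum, t.2.2.2 + (l.map f4).sum) := by
  induction l generalizing t with
  | nil => simp
  | cons x xs ih =>
    simp only [List.foldl_cons, List.map_cons, List.sum_cons, ih]
    refine Prod.ext (by simp; ring) (Prod.ext (by simp; ring) (Prod.ext (by simp; ring) (by simp; ring)))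

def pvCell (g : List (List Bool)) (gx gy : Int) : Bool :=
  PySem.List.pyGetD (PySem.List.pyGetD g gy []) gx false

def pvCols (g : List (List Bool)) : Int :=
  if (g.length : Int) ≠ 0 then ((PySem.List.pyGetD g 0 []).length : Int) else 0

-- canonical per-component value: number of true cells in the window [a,b) x [c,d),
-- counted over the 10x10 bounding box around (px,py)
def pvN (g : List (List Bool)) (px py a b c d : Int) : Int :=
  pvSumR (py-5) (py+5) (fun gy => pvSumR (px-5) (px+5) (fun gx =>
    if 0 ≤ gy ∧ gy < (g.length : Int) ∧ 0 ≤ gx ∧ gx < pvCols g ∧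
       a ≤ gx ∧ gx < b ∧ c ≤ gy ∧ gy < d ∧ pvCell g gx gy = true
    then 1 else 0))

theorem pvA_comp (g : List (List Bool)) (px py a b c d : Int)
    (hx1 : px - 5 ≤ a) (hx2 : b ≤ px + 5) (hy1 : py - 5 ≤ c) (hy2 : d ≤ py + 5) :
    (PySem.List.pyRange c d 1).foldl (fun total gy =>
      if 0 ≤ gy ∧ gy < (g.length : Int) then
        (PySem.List.pyRange a b 1).foldl (fun t gx =>
          if 0 ≤ gx ∧ gx < pvCols g ∧ pvCell g gx gy = true then t + 1 else t) total
      else total) 0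
    = pvN g px py a b c d := by
  have hstep : (fun (total : Int) gy =>
      if 0 ≤ gy ∧ gy < (g.length : Int) then
        (PySem.List.pyRange a b 1).foldl (fun t gx =>
          if 0 ≤ gx ∧ gx < pvCols g ∧ pvCell g gx gy = true then t + 1 else t) total
      else total)
      = (fun (total : Int) gy =>
      if 0 ≤ gy ∧ gy < (g.length : Int) then
        total + pvSumR a b (fun gx => if 0 ≤ gx ∧ gx < pvCols g ∧ pvCell g gx gy = true then 1 else 0)
      else total) := by
    funext total gy
    split_ifs with h
    · rw [pv_foldl_count]; rfl
    · rfl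
  rw [hstep, pv_foldl_addf]
  unfold pvN
  rw [show ((PySem.List.pyRange c d 1).map (fun gy => if 0 ≤ gy ∧ gy < (g.length : Int) then
        pvSumR a b (fun gx => if 0 ≤ gx ∧ gx < pvCols g ∧ pvCell g gx gy = true then 1 else 0)
      else 0)).sum = pvSumR c d (fun gy => if 0 ≤ gy ∧ gy < (g.length : Int) then
        pvSumR a b (fun gx => if 0 ≤ gx ∧ gx < pvCols g ∧ pvCell g gx gy = true then 1 else 0)
      else 0) from rfl]
  rw [zero_add]
  have step2 : pvSumR (py-5) (py+5) (fun gy => pvSumR (px-5) (px+5) (fun gx =>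
      if 0 ≤ gy ∧ gy < (g.length : Int) ∧ 0 ≤ gx ∧ gx < pvCols g ∧
         a ≤ gx ∧ gx < b ∧ c ≤ gy ∧ gy < d ∧ pvCell g gx gy = true
      then 1 else 0))
      = pvSumR c d (fun gy => pvSumR (px-5) (px+5) (fun gx =>
      if 0 ≤ gy ∧ gy < (g.length : Int) ∧ 0 ≤ gx ∧ gx < pvCols g ∧
         a ≤ gx ∧ gx < b ∧ c ≤ gy ∧ gy < d ∧ pvCell g gx gy = true
      then 1 else 0)) := by
    apply pvSumR_extend _ _ _ _ _ hy1 hy2 (by omega)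
    intro gy hne
    by_contra hcd
    exact hne (pvSumR_zero _ _ _ (fun gx _ _ => by
      rw [if_neg]; intro hc; exact hcd ⟨hc.2.2.2.2.2.2.1, hc.2.2.2.2.2.2.2.1⟩))
  rw [step2]
  apply pvSumR_congr
  intro gy hc hd
  split_ifs with hrow
  · have e1 : pvSumR (px-5) (px+5) (fun gx =>
        if 0 ≤ gy ∧ gy < (g.length : Int) ∧ 0 ≤ gx ∧ gx < pvCols g ∧
           a ≤ gx ∧ gx < b ∧ c ≤ gy ∧ gy < d ∧ pvCell g gx gy = true
        then (1:Int) else 0)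
        = pvSumR a b (fun gx =>
        if 0 ≤ gy ∧ gy < (g.length : Int) ∧ 0 ≤ gx ∧ gx < pvCols g ∧
           a ≤ gx ∧ gx < b ∧ c ≤ gy ∧ gy < d ∧ pvCell g gx gy = true
        then (1:Int) else 0) := by
      apply pvSumR_extend _ _ _ _ _ hx1 hx2 (by omega)
      intro gx hne
      by_contra hab
      apply hne
      rw [if_neg]; intro hcj; exact hab ⟨hcj.2.2.2.2.1, hcj.2.2.2.2.2.1⟩
    rw [e1]
    apply pvSumR_congr
    intro gx ha hb
    split_ifs with h1 h2 <;> first | rfl | (exfalso; tauto)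
  · symm
    apply pvSumR_zero
    intro gx _ _
    rw [if_neg]; intro hcj; exact hrow ⟨hcj.1, hcj.2.1⟩


theorem pvA_norm (px py : Int) (g : List (List Bool)) :
    directional_seeds_py px py g =
      (pvN g px py px (px+5) (py-2) (py+3),
       pvN g px py (px-5) px (py-2) (py+3),
       pvN g px py (px-2) (px+3) py (py+5),
       pvN g px py (px-2) (px+3) (py-5) py) := by
  simp only [directional_seeds_py]
  refine Prod.ext ?_ (Prod.ext ?_ (Prod.ext ?_ ?_)) <;>
    simp only
  · exact pvA_comp g px py px (px+5) (py-2) (py+3) (by omega) (by omega) (by omega) (by omega)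
  · exact pvA_comp g px py (px-5) px (py-2) (py+3) (by omega) (by omega) (by omega) (by omega)
  · exact pvA_comp g px py (px-2) (px+3) py (py+5) (by omega) (by omega) (by omega) (by omega)
  · exact pvA_comp g px py (px-2) (px+3) (py-5) py (by omega) (by omega) (by omega) (by omega)

theorem pvB_comp (g : List (List Bool)) (px py a b c d : Int)
    (ANY OK : Int → Int → Prop)
    [∀ gx gy, Decidable (ANY gx gy)] [∀ gx gy, Decidable (OK gx gy)]
    (hOK : ∀ gx gy, OK gx gy ↔ a ≤ gx ∧ gx < b ∧ c ≤ gy ∧ gy < d)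
    (hANY : ∀ gx gy, OK gx gy → ANY gx gy) :
    pvSumR (py-5) (py+5) (fun gy =>
      if 0 ≤ gy ∧ gy < (g.length : Int) then
        pvSumR (px-5) (px+5) (fun gx =>
          if 0 ≤ gx ∧ gx < pvCols g then
            (if ANY gx gy ∧ pvCell g gx gy = true then (if OK gx gy then 1 else 0) else 0)
          else 0)
      else 0)
    = pvN g px py a b c d := by
  unfold pvN
  apply pvSumR_congr
  intro gy hgy1 hgy2
  split_ifs with hrow
  · apply pvSumR_congr
    intro gx hgx1 hgx2
    by_cases hcols : 0 ≤ gx ∧ gx < pvCols g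
    · rw [if_pos hcols]
      by_cases hcell : pvCell g gx gy = true
      · by_cases hok : OK gx gy
        · have hw := (hOK gx gy).mp hok
          rw [if_pos ⟨hANY _ _ hok, hcell⟩, if_pos hok,
              if_pos ⟨hrow.1, hrow.2, hcols.1, hcols.2, hw.1, hw.2.1, hw.2.2.1, hw.2.2.2, hcell⟩]
        · have hr : ¬(0 ≤ gy ∧ gy < (g.length : Int) ∧ 0 ≤ gx ∧ gx < pvCols g ∧
              a ≤ gx ∧ gx < b ∧ c ≤ gy ∧ gy < d ∧ pvCell g gx gy = true) := by
            intro hc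
            exact hok ((hOK gx gy).mpr ⟨hc.2.2.2.2.1, hc.2.2.2.2.2.1, hc.2.2.2.2.2.2.1, hc.2.2.2.2.2.2.2.1⟩)
          rw [if_neg hr]
          split_ifs <;> rfl
      · rw [if_neg (fun hc => hcell hc.2),
            if_neg (fun hc => hcell hc.2.2.2.2.2.2.2.2)]
    · rw [if_neg hcols, if_neg (fun hc => hcols ⟨hc.2.2.1, hc.2.2.2.1⟩)]
  · symm
    apply pvSumR_zero
    intro gx _ _
    exact if_neg (fun hc => hrow ⟨hc.1, hc.2.1⟩)

theorem pvB_norm (px py : Int) (g : List (List Bool)) :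
    directional_seeds_py_alt px py g =
      (pvN g px py px (px+5) (py-2) (py+3),
       pvN g px py (px-5) px (py-2) (py+3),
       pvN g px py (px-2) (px+3) py (py+5),
       pvN g px py (px-2) (px+3) (py-5) py) := by
  simp only [directional_seeds_py_alt]
  have hinner : ∀ gy : Int,
      (fun (acc2 : Int × Int × Int × Int) (gx : Int) =>
        if 0 ≤ gx ∧ gx < (if (g.length : Int) ≠ 0 then ((PySem.List.pyGetD g 0 []).length : Int) else 0) then
          if ((py - 2 ≤ gy ∧ gy < py + 3 ∧ px ≤ gx ∧ gx < px + 5) ∨ (py - 2 ≤ gy ∧ gy < py + 3 ∧ px - 5 ≤ gx ∧ gx < px) ∨ (px - 2 ≤ gx ∧ gx < px + 3 ∧ py ≤ gy ∧ gy < py + 5) ∨ (px - 2 ≤ gx ∧ gx < px + 3 ∧ py - 5 ≤ gy ∧ gy < py)) ∧ PySem.List.pyGetD (PySem.List.pyGetD g gy []) gx false = true then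
            (acc2.1 + (if py - 2 ≤ gy ∧ gy < py + 3 ∧ px ≤ gx ∧ gx < px + 5 then (1:Int) else 0), acc2.2.1 + (if py - 2 ≤ gy ∧ gy < py + 3 ∧ px - 5 ≤ gx ∧ gx < px then (1:Int) else 0), acc2.2.2.1 + (if px - 2 ≤ gx ∧ gx < px + 3 ∧ py ≤ gy ∧ gy < py + 5 then (1:Int) else 0), acc2.2.2.2 + (if px - 2 ≤ gx ∧ gx < px + 3 ∧ py - 5 ≤ gy ∧ gy < py then (1:Int) else 0))
          else acc2
        else acc2)
      = (fun (acc2 : Int × Int × Int × Int) (gx : Int) =>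
          (acc2.1 + (if 0 ≤ gx ∧ gx < (if (g.length : Int) ≠ 0 then ((PySem.List.pyGetD g 0 []).length : Int) else 0) then (if ((py - 2 ≤ gy ∧ gy < py + 3 ∧ px ≤ gx ∧ gx < px + 5) ∨ (py - 2 ≤ gy ∧ gy < py + 3 ∧ px - 5 ≤ gx ∧ gx < px) ∨ (px - 2 ≤ gx ∧ gx < px + 3 ∧ py ≤ gy ∧ gy < py + 5) ∨ (px - 2 ≤ gx ∧ gx < px + 3 ∧ py - 5 ≤ gy ∧ gy < py)) ∧ PySem.List.pyGetD (PySem.List.pyGetD g gy []) gx false = true then (if py - 2 ≤ gy ∧ gy < py + 3 ∧ px ≤ gx ∧ gx < px + 5 then (1:Int) else 0) else 0) else 0), acc2.2.1 + (if 0 ≤ gx ∧ gx < (if (g.length : Int) ≠ 0 then ((PySem.List.pyGetD g 0 []).length : Int) else 0) then (if ((py - 2 ≤ gy ∧ gy < py + 3 ∧ px ≤ gx ∧ gx < px + 5) ∨ (py - 2 ≤ gy ∧ gy < py + 3 ∧ px - 5 ≤ gx ∧ gx < px) ∨ (px - 2 ≤ gx ∧ gx < px + 3 ∧ py ≤ gy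 ∧ gy < py + 5) ∨ (px - 2 ≤ gx ∧ gx < px + 3 ∧ py - 5 ≤ gy ∧ gy < py)) ∧ PySem.List.pyGetD (PySem.List.pyGetD g gy []) gx false = true then (if py - 2 ≤ gy ∧ gy < py + 3 ∧ px - 5 ≤ gx ∧ gx < px then (1:Int) else 0) else 0) else 0), acc2.2.2.1 + (if 0 ≤ gx ∧ gx < (if (g.length : Int) ≠ 0 then ((PySem.List.pyGetD g 0 []).length : Int) else 0) then (if ((py - 2 ≤ gy ∧ gy < py + 3 ∧ px ≤ gx ∧ gx < px + 5) ∨ (py - 2 ≤ gy ∧ gy < py + 3 ∧ px - 5 ≤ gx ∧ gx < px) ∨ (px - 2 ≤ gx ∧ gx < px + 3 ∧ py ≤ gy ∧ gy < py + 5) ∨ (px - 2 ≤ gx ∧ gx < px + 3 ∧ py - 5 ≤ gy ∧ gy < py)) ∧ PySem.List.pyGetD (PySem.List.pyGetD g gy []) gx false = true then (if px - 2 ≤ gx ∧ gx < px + 3 ∧ py ≤ gy ∧ gy < py + 5 then (1:Int) else 0) else 0) else 0), acc2.2.2.2 + (if 0 ≤ gx ∧ gx < (if (g.length : Int) ≠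 0 then ((PySem.List.pyGetD g 0 []).length : Int) else 0) then (if ((py - 2 ≤ gy ∧ gy < py + 3 ∧ px ≤ gx ∧ gx < px + 5) ∨ (py - 2 ≤ gy ∧ gy < py + 3 ∧ px - 5 ≤ gx ∧ gx < px) ∨ (px - 2 ≤ gx ∧ gx < px + 3 ∧ py ≤ gy ∧ gy < py + 5) ∨ (px - 2 ≤ gx ∧ gx < px + 3 ∧ py - 5 ≤ gy ∧ gy < py)) ∧ PySem.List.pyGetD (PySem.List.pyGetD g gy []) gx false = true then (if px - 2 ≤ gx ∧ gx < px + 3 ∧ py - 5 ≤ gy ∧ gy < py then (1:Int) else 0) else 0) else 0))) := by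
    intro gy
    funext acc2 gx
    by_cases h1 : 0 ≤ gx ∧ gx < (if (g.length : Int) ≠ 0 then ((PySem.List.pyGetD g 0 []).length : Int) else 0)
    · by_cases h2 : ((py - 2 ≤ gy ∧ gy < py + 3 ∧ px ≤ gx ∧ gx < px + 5) ∨ (py - 2 ≤ gy ∧ gy < py + 3 ∧ px - 5 ≤ gx ∧ gx < px) ∨ (px - 2 ≤ gx ∧ gx < px + 3 ∧ py ≤ gy ∧ gy < py + 5) ∨ (px - 2 ≤ gx ∧ gx < px + 3 ∧ py - 5 ≤ gy ∧ gy < py)) ∧ PySem.List.pyGetD (PySem.List.pyGetD g gy []) gx false = true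
      · simp only [if_pos h1, if_pos h2]
      · simp only [if_pos h1, if_neg h2, add_zero]
    · simp only [if_neg h1, add_zero]
  have hstep : (fun (acc : Int × Int × Int × Int) (gy : Int) =>
      if 0 ≤ gy ∧ gy < (g.length : Int) then
        (PySem.List.pyRange (px-5) (px+5) 1).foldl (fun (acc2 : Int × Int × Int × Int) (gx : Int) =>
          if 0 ≤ gx ∧ gx < (if (g.length : Int) ≠ 0 then ((PySem.List.pyGetD g 0 []).length : Int) else 0) then
            if ((py - 2 ≤ gy ∧ gy < py + 3 ∧ px ≤ gx ∧ gx < px + 5) ∨ (py - 2 ≤ gy ∧ gy < py + 3 ∧ px - 5 ≤ gx ∧ gx < px) ∨ (px - 2 ≤ gx ∧ gx < px + 3 ∧ py ≤ gy ∧ gy < py + 5) ∨ (px - 2 ≤ gx ∧ gx < px + 3 ∧ py - 5 ≤ gy ∧ gy < py)) ∧ PySem.List.pyGetD (PySem.List.pyGetD g gy []) gx false = true then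
              (acc2.1 + (if py - 2 ≤ gy ∧ gy < py + 3 ∧ px ≤ gx ∧ gx < px + 5 then (1:Int) else 0), acc2.2.1 + (if py - 2 ≤ gy ∧ gy < py + 3 ∧ px - 5 ≤ gx ∧ gx < px then (1:Int) else 0), acc2.2.2.1 + (if px - 2 ≤ gx ∧ gx < px + 3 ∧ py ≤ gy ∧ gy < py + 5 then (1:Int) else 0), acc2.2.2.2 + (if px - 2 ≤ gx ∧ gx < px + 3 ∧ py - 5 ≤ gy ∧ gy < py then (1:Int) else 0))
            else acc2
          else acc2) acc
      else acc)
      = (fun (acc : Int × Int × Int × Int) (gy : Int) =>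
          (acc.1 + (if 0 ≤ gy ∧ gy < (g.length : Int) then pvSumR (px-5) (px+5) (fun gx => (if 0 ≤ gx ∧ gx < (if (g.length : Int) ≠ 0 then ((PySem.List.pyGetD g 0 []).length : Int) else 0) then (if ((py - 2 ≤ gy ∧ gy < py + 3 ∧ px ≤ gx ∧ gx < px + 5) ∨ (py - 2 ≤ gy ∧ gy < py + 3 ∧ px - 5 ≤ gx ∧ gx < px) ∨ (px - 2 ≤ gx ∧ gx < px + 3 ∧ py ≤ gy ∧ gy < py + 5) ∨ (px - 2 ≤ gx ∧ gx < px + 3 ∧ py - 5 ≤ gy ∧ gy < py)) ∧ PySem.List.pyGetD (PySem.List.pyGetD g gy []) gx false = true then (if py - 2 ≤ gy ∧ gy < py + 3 ∧ px ≤ gx ∧ gx < px + 5 then (1:Int) else 0) else 0) else 0)) else 0), acc.2.1 + (if 0 ≤ gy ∧ gy < (g.length : Int) then pvSumR (px-5) (px+5) (fun gx => (if 0 ≤ gx ∧ gx < (if (g.length : Int) ≠ 0 then ((PySem.List.pyGetD g 0 []).length : Int) else 0) then (if ((py - 2 ≤ gy ∧ gy < py + 3 ∧ px ≤ gx ∧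 gx < px + 5) ∨ (py - 2 ≤ gy ∧ gy < py + 3 ∧ px - 5 ≤ gx ∧ gx < px) ∨ (px - 2 ≤ gx ∧ gx < px + 3 ∧ py ≤ gy ∧ gy < py + 5) ∨ (px - 2 ≤ gx ∧ gx < px + 3 ∧ py - 5 ≤ gy ∧ gy < py)) ∧ PySem.List.pyGetD (PySem.List.pyGetD g gy []) gx false = true then (if py - 2 ≤ gy ∧ gy < py + 3 ∧ px - 5 ≤ gx ∧ gx < px then (1:Int) else 0) else 0) else 0)) else 0), acc.2.2.1 + (if 0 ≤ gy ∧ gy < (g.length : Int) then pvSumR (px-5) (px+5) (fun gx => (if 0 ≤ gx ∧ gx < (if (g.length : Int) ≠ 0 then ((PySem.List.pyGetD g 0 []).length : Int) else 0) then (if ((py - 2 ≤ gy ∧ gy < py + 3 ∧ px ≤ gx ∧ gx < px + 5) ∨ (py - 2 ≤ gy ∧ gy < py + 3 ∧ px - 5 ≤ gx ∧ gx < px) ∨ (px - 2 ≤ gx ∧ gx < px + 3 ∧ py ≤ gy ∧ gy < py + 5) ∨ (px - 2 ≤ gx ∧ gx < px + 3 ∧ py - 5 ≤ gy ∧ gy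 < py)) ∧ PySem.List.pyGetD (PySem.List.pyGetD g gy []) gx false = true then (if px - 2 ≤ gx ∧ gx < px + 3 ∧ py ≤ gy ∧ gy < py + 5 then (1:Int) else 0) else 0) else 0)) else 0), acc.2.2.2 + (if 0 ≤ gy ∧ gy < (g.length : Int) then pvSumR (px-5) (px+5) (fun gx => (if 0 ≤ gx ∧ gx < (if (g.length : Int) ≠ 0 then ((PySem.List.pyGetD g 0 []).length : Int) else 0) then (if ((py - 2 ≤ gy ∧ gy < py + 3 ∧ px ≤ gx ∧ gx < px + 5) ∨ (py - 2 ≤ gy ∧ gy < py + 3 ∧ px - 5 ≤ gx ∧ gx < px) ∨ (px - 2 ≤ gx ∧ gx < px + 3 ∧ py ≤ gy ∧ gy < py + 5) ∨ (px - 2 ≤ gx ∧ gx < px + 3 ∧ py - 5 ≤ gy ∧ gy < py)) ∧ PySem.List.pyGetD (PySem.List.pyGetD g gy []) gx false = true then (if px - 2 ≤ gx ∧ gx < px + 3 ∧ py - 5 ≤ gy ∧ gy < py then (1:Int) else 0) else 0) else 0)) else 0))) := by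
    funext acc gy
    by_cases hrow : 0 ≤ gy ∧ gy < (g.length : Int)
    · simp only [if_pos hrow]
      rw [hinner gy, pv_foldl4]
      rfl
    · simp only [if_neg hrow, add_zero]
  rw [hstep, pv_foldl4]
  refine Prod.ext ?_ (Prod.ext ?_ (Prod.ext ?_ ?_)) <;> simp only [zero_add]
  · exact pvB_comp g px py px (px+5) (py-2) (py+3)
      (fun gx gy => (py - 2 ≤ gy ∧ gy < py + 3 ∧ px ≤ gx ∧ gx < px + 5) ∨ (py - 2 ≤ gy ∧ gy < py + 3 ∧ px - 5 ≤ gx ∧ gx < px) ∨ (px - 2 ≤ gx ∧ gx < px + 3 ∧ py ≤ gy ∧ gy < py + 5) ∨ (px - 2 ≤ gx ∧ gx < px + 3 ∧ py - 5 ≤ gy ∧ gy < py)) (fun gx gy => py - 2 ≤ gy ∧ gy < py + 3 ∧ px ≤ gx ∧ gx < px + 5)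
      (fun gx gy => Iff.intro (fun h => ⟨h.2.2.1, h.2.2.2, h.1, h.2.1⟩) (fun h => ⟨h.2.2.1, h.2.2.2, h.1, h.2.1⟩))
      (fun _ _ h => Or.inl h)
  · exact pvB_comp g px py (px-5) px (py-2) (py+3)
      (fun gx gy => (py - 2 ≤ gy ∧ gy < py + 3 ∧ px ≤ gx ∧ gx < px + 5) ∨ (py - 2 ≤ gy ∧ gy < py + 3 ∧ px - 5 ≤ gx ∧ gx < px) ∨ (px - 2 ≤ gx ∧ gx < px + 3 ∧ py ≤ gy ∧ gy < py + 5) ∨ (px - 2 ≤ gx ∧ gx < px + 3 ∧ py - 5 ≤ gy ∧ gy < py)) (fun gx gy => py - 2 ≤ gy ∧ gy < py + 3 ∧ px - 5 ≤ gx ∧ gx < px)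
      (fun gx gy => Iff.intro (fun h => ⟨h.2.2.1, h.2.2.2, h.1, h.2.1⟩) (fun h => ⟨h.2.2.1, h.2.2.2, h.1, h.2.1⟩))
      (fun _ _ h => Or.inr (Or.inl h))
  · exact pvB_comp g px py (px-2) (px+3) py (py+5)
      (fun gx gy => (py - 2 ≤ gy ∧ gy < py + 3 ∧ px ≤ gx ∧ gx < px + 5) ∨ (py - 2 ≤ gy ∧ gy < py + 3 ∧ px - 5 ≤ gx ∧ gx < px) ∨ (px - 2 ≤ gx ∧ gx < px + 3 ∧ py ≤ gy ∧ gy < py + 5) ∨ (px - 2 ≤ gx ∧ gx < px + 3 ∧ py - 5 ≤ gy ∧ gy < py)) (fun gx gy => px - 2 ≤ gx ∧ gx < px + 3 ∧ py ≤ gy ∧ gy < py + 5)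
      (fun gx gy => Iff.intro (fun h => ⟨h.1, h.2.1, h.2.2.1, h.2.2.2⟩) (fun h => ⟨h.1, h.2.1, h.2.2.1, h.2.2.2⟩))
      (fun _ _ h => Or.inr (Or.inr (Or.inl h)))
  · exact pvB_comp g px py (px-2) (px+3) (py-5) py
      (fun gx gy => (py - 2 ≤ gy ∧ gy < py + 3 ∧ px ≤ gx ∧ gx < px + 5) ∨ (py - 2 ≤ gy ∧ gy < py + 3 ∧ px - 5 ≤ gx ∧ gx < px) ∨ (px - 2 ≤ gx ∧ gx < px + 3 ∧ py ≤ gy ∧ gy < py + 5) ∨ (px - 2 ≤ gx ∧ gx < px + 3 ∧ py - 5 ≤ gy ∧ gy < py)) (fun gx gy => px - 2 ≤ gx ∧ gx < px + 3 ∧ py - 5 ≤ gy ∧ gy < py)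
      (fun gx gy => Iff.intro (fun h => ⟨h.1, h.2.1, h.2.2.1, h.2.2.2⟩) (fun h => ⟨h.1, h.2.1, h.2.2.1, h.2.2.2⟩))
      (fun _ _ h => Or.inr (Or.inr (Or.inr h)))

-- ===== VERDICT (by name: the statement is the Claim_ definition above) =====
theorem directional_seeds_py_spec : Claim_equal_directional_seeds_py := by
  intro px py g _ _
  unfold Spec_directional_seeds_py
  rw [pvA_norm, pvB_norm]
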